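-- pv_equiv track=rewrite | github.com/Nghia03092004/nghia03092004.github.io | project_euler/problem_732/solution.py | generate_trolls
-- ===== SOURCE A (Python) =====
-- MOD_GEN = 10**9 + 7
--
-- def generate_trolls(N):
--     """Generate troll parameters using the given PRNG."""
--     r = [0] * (3 * N + 3)
--     r[0] = 1  # 5^0 mod (10^9+7) = 1
--     for n in range(1, 3 * N + 3):
--         r[n] = (r[n-1] * 5) % MOD_GEN
--     for n in range(3 * N + 3):
--         r[n] = (r[n] % 101) + 50
--
--     trolls = []
--     for n in range(N):
--         h = r[3*n]
--         l = r[3*n+1]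
--         q = r[3*n+2]
--         trolls.append((h, l, q))
--     return trolls
-- ===== SOURCE B (Python) =====
-- MOD_GEN = 10**9 + 7
--
-- def generate_trolls(N):
--     """Generate troll parameters via the closed form 5^k mod (10^9+7),
--     computed independently per element with built-in modular exponentiation."""
--     def f(k):
--         return pow(5, k, MOD_GEN) % 101 + 50
--     return [(f(3 * n), f(3 * n + 1), f(3 * n + 2)) for n in range(N)]
-- ===== Notes on version B (the rewrite author's own statement) =====
-- stated objective: alternative
-- what changed: B drops A's linear recurrence and mutable 3N+3 array entirely: each troll value is the closed form pow(5, k, MOD_GEN) % 101 + 50, computed independently per index by built-in modular exponentiation, so no state is carried between elements.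
import Mathlib
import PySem

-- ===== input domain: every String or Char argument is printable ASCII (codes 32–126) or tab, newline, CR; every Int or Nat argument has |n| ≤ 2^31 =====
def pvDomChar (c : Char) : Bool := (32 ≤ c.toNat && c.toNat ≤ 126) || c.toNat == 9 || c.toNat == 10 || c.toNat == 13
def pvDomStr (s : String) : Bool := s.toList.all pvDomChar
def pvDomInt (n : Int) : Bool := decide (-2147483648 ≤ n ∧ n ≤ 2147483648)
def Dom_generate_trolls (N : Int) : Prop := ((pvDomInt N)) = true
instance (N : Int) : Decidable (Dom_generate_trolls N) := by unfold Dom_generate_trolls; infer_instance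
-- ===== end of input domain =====

-- B replaces A's linear recurrence + mutable array by the closed form pow(5,k,MOD)%101+50 per element (objective: alternative).

def MOD_GEN : Int := 10 ^ 9 + 7

-- ===== PORT A =====
def generate_trolls (N : Int) : List (Int × Int × Int) :=
  let r0 : List Int := List.replicate (3 * N + 3).toNat 0
  let r1 := PySem.List.pySetD r0 0 1
  let r2 := (PySem.List.pyRange 1 (3 * N + 3) 1).foldl
    (fun r n => PySem.List.pySetD r n (PySem.List.pyGetD r (n - 1) 0 * 5 % MOD_GEN)) r1
  let r3 := (PySem.List.pyRange 0 (3 * N + 3) 1).foldl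
    (fun r n => PySem.List.pySetD r n (PySem.List.pyGetD r n 0 % 101 + 50)) r2
  (PySem.List.pyRange 0 N 1).foldl
    (fun trolls n =>
      trolls ++ [(PySem.List.pyGetD r3 (3 * n) 0,
                  PySem.List.pyGetD r3 (3 * n + 1) 0,
                  PySem.List.pyGetD r3 (3 * n + 2) 0)]) []

-- ===== PORT B =====
-- Python's pow(5, k, MOD_GEN) (built-in modular exponentiation, k ≥ 0 here) is
-- ported as the corresponding Lean function 5 ^ k.toNat % MOD_GEN.
def pyPowMod5 (k : Int) : Int := 5 ^ k.toNat % MOD_GEN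

def generate_trolls_alt (N : Int) : List (Int × Int × Int) :=
  let f : Int → Int := fun k => pyPowMod5 k % 101 + 50
  (PySem.List.pyRange 0 N 1).map (fun n => (f (3 * n), f (3 * n + 1), f (3 * n + 2)))

-- ===== PRECONDITION & SPEC =====
-- A raises IndexError for N < 0 ([0]*(3N+3) is empty there, so r[0] = 1 fails); Pre_ excludes exactly those.
def Pre_generate_trolls (N : Int) : Prop := 0 ≤ N
instance (N : Int) : Decidable (Pre_generate_trolls N) := by unfold Pre_generate_trolls; infer_instance
def pvWitness_generate_trolls : Int := 2

def Spec_generate_trolls (N : Int) (out : List (Int × Int × Int)) : Prop := out = generate_trolls_alt N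
instance (N : Int) (out : List (Int × Int × Int)) : Decidable (Spec_generate_trolls N out) := by unfold Spec_generate_trolls; infer_instance

-- ===== CLAIM (what is proved, stated in full; the proofs are below) =====
def Claim_equal_generate_trolls : Prop := ∀ (N : Int), Dom_generate_trolls N → Pre_generate_trolls N → Spec_generate_trolls N (generate_trolls N)

-- ===== LEMMAS AND PROOFS =====

/-- The raw PRNG value at step k: 5^k mod (10^9+7). -/
def pw (k : Nat) : Int := 5 ^ k % MOD_GEN

/-- The transformed value at step k. -/
def gv (k : Nat) : Int := pw k % 101 + 50

/-- The common reference result: m troll tuples. -/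
def ref (m : Nat) : List (Int × Int × Int) :=
  (List.range m).map (fun n => (gv (3 * n), gv (3 * n + 1), gv (3 * n + 2)))

theorem pw_succ (k : Nat) : pw (k + 1) = pw k * 5 % MOD_GEN := by
  have h5 : (5 : Int) % MOD_GEN = 5 := by decide
  unfold pw
  rw [pow_succ, Int.mul_emod (5 ^ k) 5, h5]

theorem pw_zero : pw 0 = 1 := by decide

theorem set_map_range (f : Nat → Int) (L j : Nat) (v : Int) :
    ((List.range L).map f).set j v
      = (List.range L).map (fun k => if k = j then v else f k) := by
  apply List.ext_getElem
  · simp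
  · intro i h1 h2
    simp only [List.getElem_set, List.getElem_map, List.getElem_range]
    split <;> simp_all <;> omega

/-- The loop body of A's first (power-filling) pass. -/
def stepF (r : List Int) (n : Int) : List Int :=
  PySem.List.pySetD r n (PySem.List.pyGetD r (n - 1) 0 * 5 % MOD_GEN)

/-- The loop body of A's second (transform) pass. -/
def stepT (r : List Int) (n : Int) : List Int :=
  PySem.List.pySetD r n (PySem.List.pyGetD r n 0 % 101 + 50)

theorem fill_base (L : Nat) :
    PySem.List.pySetD (List.replicate L (0:Int)) 0 1
      = (List.range L).map (fun k => if k < 1 then pw k else 0) := by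
  rw [PySem.List.pySetD_of_nonneg _ _ (by omega)]
  apply List.ext_getElem
  · simp
  · intro i h1 h2
    simp only [List.getElem_set, List.getElem_replicate, List.getElem_map, List.getElem_range]
    by_cases h : i = 0 <;> simp [h, pw_zero] <;> omega

theorem fill_inv (L : Nat) (j : Nat) (hj1 : 1 ≤ j) : j ≤ L →
    (PySem.List.pyRange 1 (j : Int) 1).foldl stepF
        (PySem.List.pySetD (List.replicate L (0:Int)) 0 1)
      = (List.range L).map (fun k => if k < j then pw k else 0) := by
  induction j, hj1 using Nat.le_induction with
  | base =>
    intro _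
    simp [PySem.List.pyRange_one_eq_nil, fill_base L]
  | succ j hj ih =>
    intro hjL
    push_cast
    rw [PySem.List.pyRange_one_succ_right (by exact_mod_cast Nat.one_le_cast.mpr hj),
      List.foldl_append, ih (by omega)]
    simp only [List.foldl]
    unfold stepF
    have hc : (j : Int) - 1 = ((j - 1 : Nat) : Int) := by omega
    rw [hc, PySem.List.pyGetD_natCast, PySem.List.getD_map_range _ _ _ _ (by omega),
      PySem.List.pySetD_natCast]
    have hv : (if j - 1 < j then pw (j-1) else 0) * 5 % MOD_GEN = pw j := by
      have : j - 1 < j := by omega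
      simp only [this, if_pos]
      rw [← pw_succ]
      congr 1
      omega
    rw [hv, set_map_range]
    apply List.map_congr_left
    intro k hk
    by_cases h1 : k = j
    · simp [h1]
    · by_cases h2 : k < j <;> simp [h1, h2] <;> omega

theorem trans_inv (L : Nat) (j : Nat) : j ≤ L →
    (PySem.List.pyRange 0 (j : Int) 1).foldl stepT ((List.range L).map pw)
      = (List.range L).map (fun k => if k < j then gv k else pw k) := by
  induction j with
  | zero => intro _; simp [PySem.List.pyRange_one_eq_nil]
  | succ j ih =>
    intro hjL
    push_cast
    rw [PySem.List.pyRange_one_succ_right (by positivity), List.foldl_append, ih (by omega)]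
    simp only [List.foldl]
    unfold stepT
    rw [PySem.List.pyGetD_natCast, PySem.List.getD_map_range _ _ _ _ (by omega),
      PySem.List.pySetD_natCast, set_map_range]
    have hv : (if j < j then gv j else pw j) % 101 + 50 = gv j := by simp [gv]
    rw [hv]
    apply List.map_congr_left
    intro k hk
    by_cases h1 : k = j
    · simp [h1]
    · by_cases h2 : k < j <;> simp [h1, h2] <;> omega

theorem A_eq (N : Int) (hN : 0 ≤ N) : generate_trolls N = ref N.toNat := by
  have hfold : ∀ (r3 : List Int) (b : Int),
      (PySem.List.pyRange 0 b 1).foldl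
        (fun trolls n =>
          trolls ++ [(PySem.List.pyGetD r3 (3 * n) 0,
                      PySem.List.pyGetD r3 (3 * n + 1) 0,
                      PySem.List.pyGetD r3 (3 * n + 2) 0)]) []
        = (PySem.List.pyRange 0 b 1).map (fun n =>
            (PySem.List.pyGetD r3 (3 * n) 0,
             PySem.List.pyGetD r3 (3 * n + 1) 0,
             PySem.List.pyGetD r3 (3 * n + 2) 0)) := by
    intro r3 b
    exact PySem.List.foldl_append_singleton_eq_map _ _ []
  simp only [generate_trolls]
  set L := 3 * N.toNat + 3 with hLdef
  have h1 : (3 * N + 3).toNat = L := by omega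
  have h2 : (3 * N + 3) = (L : Int) := by omega
  rw [h1, h2]
  rw [show (fun (r : List Int) (n : Int) =>
        PySem.List.pySetD r n (PySem.List.pyGetD r (n - 1) 0 * 5 % MOD_GEN)) = stepF from rfl,
      show (fun (r : List Int) (n : Int) =>
        PySem.List.pySetD r n (PySem.List.pyGetD r n 0 % 101 + 50)) = stepT from rfl]
  rw [fill_inv L L (by omega) le_rfl]
  have e1 : (List.range L).map (fun k => if k < L then pw k else 0) = (List.range L).map pw := by
    apply List.map_congr_left; intro k hk; simp at hk; simp [hk]
  rw [e1, trans_inv L L le_rfl]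
  have e2 : (List.range L).map (fun k => if k < L then gv k else pw k) = (List.range L).map gv := by
    apply List.map_congr_left; intro k hk; simp at hk; simp [hk]
  rw [e2, hfold]
  rw [show N = ((N.toNat : Nat) : Int) by omega, PySem.List.pyRange_zero_natCast, List.map_map]
  unfold ref
  apply List.map_congr_left
  intro k hk
  simp only [List.mem_range] at hk
  simp only [Function.comp]
  have c0 : (3 * (k : Int)) = ((3 * k : Nat) : Int) := by push_cast; ring
  have c1 : ((3 * k : Nat) : Int) + 1 = ((3 * k + 1 : Nat) : Int) := by push_cast; ring
  have c2 : ((3 * k : Nat) : Int) + 2 = ((3 * k + 2 : Nat) : Int) := by push_cast; ring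
  rw [c0, c1, c2, PySem.List.pyGetD_natCast, PySem.List.pyGetD_natCast, PySem.List.pyGetD_natCast,
      PySem.List.getD_map_range _ _ _ _ (by omega),
      PySem.List.getD_map_range _ _ _ _ (by omega),
      PySem.List.getD_map_range _ _ _ _ (by omega)]

theorem B_eq (N : Int) (hN : 0 ≤ N) : generate_trolls_alt N = ref N.toNat := by
  simp only [generate_trolls_alt]
  rw [show N = ((N.toNat : Nat) : Int) by omega, PySem.List.pyRange_zero_natCast, List.map_map]
  unfold ref
  apply List.map_congr_left
  intro k hk
  simp only [List.mem_range] at hk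
  simp only [Function.comp]
  have h : ∀ (m : Nat), pyPowMod5 ((m : Nat) : Int) % 101 + 50 = gv m := by
    intro m
    simp [pyPowMod5, gv, pw]
  have c0 : (3 * (k : Int)) = ((3 * k : Nat) : Int) := by push_cast; ring
  have c1 : ((3 * k : Nat) : Int) + 1 = ((3 * k + 1 : Nat) : Int) := by push_cast; ring
  have c2 : ((3 * k : Nat) : Int) + 2 = ((3 * k + 2 : Nat) : Int) := by push_cast; ring
  rw [c0, c1, c2, h, h, h]

-- ===== VERDICT (by name: the statement is the Claim_ definition above) =====
theorem generate_trolls_spec : Claim_equal_generate_trolls := by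
  intro N _ hPre
  unfold Spec_generate_trolls
  rw [A_eq N hPre, B_eq N hPre]
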